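-- pv_equiv track=rewrite | github.com/eunseo-kim/Algorithm | programmers/2019 카카오 개발자 겨울 인턴십/불량 사용자.py | solution
-- ===== SOURCE A (Python) =====
-- def solution(user_id, banned_id):
--     banned_id_lists = []
--     for bid in banned_id:
--         temp = []
--         for uid in user_id:
--             possible = True
--             if len(uid) != len(bid):
--                 continue
--             for i in range(len(bid)):
--                 if bid[i] == "*":
--                     continue
--                 if bid[i] != uid[i]:
--                     possible = False
--                     break
--
--             if possible:
--                 temp.append(uid)
--         banned_id_lists.append(temp)
--
--     def dfs(path, index):
--         if len(path) == len(banned_id_lists):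
--             if str(set(sorted(path))) not in answer:
--                 answer.add(str(set(sorted(path))))
--             return
--
--         for i in range(index + 1, len(banned_id_lists)):
--             for id in banned_id_lists[i]:
--                 if id not in path:
--                     path.append(id)
--                     dfs(path, i)
--                     path.remove(id)
--
--     answer = set()
--     dfs([], -1)
--     return len(answer)
-- ===== SOURCE B (Python) =====
-- def solution(user_id, banned_id):
--     def matches(uid, bid):
--         return len(uid) == len(bid) and all(b == "*" or b == u for b, u in zip(bid, uid))
--
--     candidates = [[uid for uid in user_id if matches(uid, bid)] for bid in banned_id]
--
--     combos = [[]]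
--     for cand in candidates:
--         combos = [combo + [uid] for combo in combos for uid in cand]
--
--     return len({frozenset(c) for c in combos if len(set(c)) == len(c)})
-- ===== Notes on version B (the rewrite author's own statement) =====
-- stated objective: simpler
-- what changed: Replaces the recursive DFS backtracking with str(set(sorted(path))) dedup by a flat pass: build the same per-banned-id candidate lists, enumerate the full cartesian product, keep combinations with pairwise-distinct ids, and count the distinct frozensets.
import Mathlib
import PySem

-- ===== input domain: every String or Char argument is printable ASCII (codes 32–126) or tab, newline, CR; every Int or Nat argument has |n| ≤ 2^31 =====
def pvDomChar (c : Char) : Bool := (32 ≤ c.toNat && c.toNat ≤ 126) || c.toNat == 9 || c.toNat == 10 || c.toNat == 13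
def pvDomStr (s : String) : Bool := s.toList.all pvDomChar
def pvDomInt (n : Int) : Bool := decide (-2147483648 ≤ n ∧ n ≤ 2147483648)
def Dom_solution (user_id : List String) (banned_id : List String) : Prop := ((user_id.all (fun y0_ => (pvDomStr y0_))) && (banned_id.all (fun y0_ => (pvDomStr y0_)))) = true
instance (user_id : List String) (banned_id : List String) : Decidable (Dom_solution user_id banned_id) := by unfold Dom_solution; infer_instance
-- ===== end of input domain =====

-- B replaces A's recursive DFS backtracking (dedup via str(set(sorted(path)))) by a flat
-- product-filter-count pass over the same candidate lists; objective: simpler.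


-- ===== PORT A =====
-- inner 'for i in range(len(bid)): …' loop of A, walked over the two character lists
-- (only reached when len(uid) == len(bid), so the lists have equal length at every call)
def pvCheckA : List Char → List Char → Bool
  | [], _ => true
  | _ :: _, [] => true          -- unreachable: lengths are equal when called
  | b :: bs, u :: us =>
      if b = '*' then pvCheckA bs us
      else if b ≠ u then false
      else pvCheckA bs us

-- the 'temp' loop for one bid
def pvTempA (user_id : List String) (bid : String) : List String :=
  user_id.foldl
    (fun temp uid =>
      if PySem.Str.len uid ≠ PySem.Str.len bid then temp
      else if pvCheckA bid.toList uid.toList then temp ++ [uid] else temp)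
    []

-- dfs(path, index); str(set(sorted(path))) is ported as the sorted path: path's elements are
-- distinct, so within one run two such repr strings are equal iff the sorted lists are equal.
def pvDfsA (lists : List (List String)) (path : List String) (index : Int)
    (answer : PySem.Set (List String)) : PySem.Set (List String) :=
  if path.length = lists.length then
    -- 'if … not in answer: answer.add(…)' is exactly Set.add
    PySem.Set.add answer (PySem.List.sorted path (fun x => x) false)
  else
    (PySem.List.pyRange (index + 1) (lists.length : Int) 1).attach.foldl
      (fun ans i =>
        -- banned_id_lists[i]; i is always in range, so the default [] is never used
        (PySem.List.pyGetD lists i.1 []).foldl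
          (fun ans2 id =>
            if path.contains id then ans2
            else pvDfsA lists (path ++ [id]) i.1 ans2)
          ans)
      answer
termination_by ((lists.length : Int) - (index + 1)).toNat
decreasing_by
  have h := (PySem.List.mem_pyRange_one).mp i.2
  omega

def solution (user_id : List String) (banned_id : List String) : Int :=
  let banned_id_lists := banned_id.foldl (fun ls bid => ls ++ [pvTempA user_id bid]) []
  PySem.Set.len (pvDfsA banned_id_lists [] (-1) PySem.Set.empty)

-- ===== PORT B =====
def pvMatchB (uid bid : String) : Bool :=
  (PySem.Str.len uid == PySem.Str.len bid) &&
    (bid.toList.zip uid.toList).all (fun p => p.1 = '*' || p.1 = p.2)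

def solution_alt (user_id : List String) (banned_id : List String) : Int :=
  let candidates := banned_id.map (fun bid => user_id.filter (fun uid => pvMatchB uid bid))
  let combos := candidates.foldl
    (fun cs cand => cs.flatMap (fun c => cand.map (fun uid => c ++ [uid]))) [[]]
  -- {frozenset(c) for c in combos if len(set(c)) == len(c)}: a frozenset of distinct strings
  -- is ported as the sorted list of its elements (canonical, since each kept c is distinct)
  PySem.Set.len (PySem.Set.ofList
    ((combos.filter (fun c => PySem.Set.len (PySem.Set.ofList c) == (c.length : Int))).map
      (fun c => PySem.List.sorted c (fun x => x) false)))

-- ===== PRECONDITION & SPEC =====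
def Spec_solution (user_id : List String) (banned_id : List String) (out : Int) : Prop := out = solution_alt user_id banned_id
instance (user_id : List String) (banned_id : List String) (out : Int) : Decidable (Spec_solution user_id banned_id out) := by unfold Spec_solution; infer_instance

-- ===== CLAIM (what is proved, stated in full; the proofs are below) =====
def Claim_equal_solution : Prop := ∀ (user_id : List String) (banned_id : List String), Dom_solution user_id banned_id → Spec_solution user_id banned_id (solution user_id banned_id)

-- ===== LEMMAS AND PROOFS =====

-- the selections A's dfs completes from state (path, picked lists): one id per remaining list,
-- ids pairwise distinct and disjoint from path, in list order
def pvSels : List (List String) → List String → List (List String)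
  | [], _ => [[]]
  | l :: rest, path =>
      l.flatMap (fun y =>
        if path.contains y then []
        else (pvSels rest (path ++ [y])).map (fun q => y :: q))

-- the cartesian product of the candidate lists, head list slowest (B's enumeration order)
def pvProd : List (List String) → List (List String)
  | [] => [[]]
  | l :: rest => l.flatMap (fun y => (pvProd rest).map (fun q => y :: q))

-- generic: a fold whose steps all leave the accumulator unchanged is the identity
lemma pvFoldlFixed {α β : Type} (L : List β) (f : α → β → α) (a : α)
    (h : ∀ acc x, x ∈ L → f acc x = acc) : L.foldl f a = a := by
  induction L generalizing a with
  | nil => rfl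
  | cons x xs ih =>
      rw [List.foldl_cons, h a x (by simp)]
      exact ih a (fun acc y hy => h acc y (by simp [hy]))

-- A's index loop over the pattern = the zip/all test, when the lengths are equal
lemma pvCheckA_eq (bs us : List Char) (h : us.length = bs.length) :
    pvCheckA bs us = (bs.zip us).all (fun p => p.1 = '*' || p.1 = p.2) := by
  induction bs generalizing us with
  | nil => simp [pvCheckA]
  | cons b bs ih =>
      cases us with
      | nil => simp at h
      | cons u us =>
          simp only [pvCheckA, List.zip_cons_cons, List.all_cons]
          by_cases hb : b = '*'
          · simp [hb, ih us (by simpa using h)]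
          · by_cases hu : b = u
            · simp [hu, ih us (by simpa using h)]
            · simp [hb, hu]

-- A's temp loop builds exactly B's filtered candidate list
lemma pvTempA_eq (user_id : List String) (bid : String) :
    pvTempA user_id bid = user_id.filter (fun uid => pvMatchB uid bid) := by
  unfold pvTempA
  rw [PySem.List.foldl_congr_mem _ _
        (fun temp uid => if pvMatchB uid bid then temp ++ [uid] else temp) _ ?_]
  · rw [PySem.List.foldl_append_if]
    simp
  · intro acc uid _
    by_cases hl : PySem.Str.len uid = PySem.Str.len bid
    · have hlen : uid.toList.length = bid.toList.length := by
        have := hl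
        rw [PySem.Str.len_eq, PySem.Str.len_eq] at this
        exact_mod_cast this
      simp only [hl, pvMatchB, pvCheckA_eq bid.toList uid.toList hlen]
      simp
    · rw [if_pos hl]
      have hfalse : pvMatchB uid bid = false := by
        simp only [pvMatchB, Bool.and_eq_false_iff, beq_eq_false_iff_ne, ne_eq]
        left; exact hl
      simp [hfalse]

-- len(set(c)) == len(c) tests distinctness
lemma pvLenOfList_eq_iff (c : List String) :
    (PySem.Set.ofList c).length = c.length ↔ c.Nodup := by
  induction c using List.reverseRecOn with
  | nil => simp
  | append_singleton xs x ih =>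
      rw [PySem.Set.ofList_append_singleton]
      by_cases hx : x ∈ xs
      · have hmem : x ∈ PySem.Set.ofList xs := (PySem.Set.mem_ofList xs x).mpr hx
        rw [PySem.Set.add_of_mem hmem]
        have hle := PySem.Set.length_ofList_le xs
        constructor
        · intro h; simp at h; omega
        · intro h; exact absurd hx (by simp [List.nodup_append] at h; tauto)
      · have hmem : x ∉ PySem.Set.ofList xs := fun hh => hx ((PySem.Set.mem_ofList xs x).mp hh)
        rw [PySem.Set.add_of_not_mem hmem]
        simp only [List.length_append, List.length_cons, List.length_nil, List.nodup_append,
          List.nodup_singleton, true_and]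
        constructor
        · intro h
          refine ⟨ih.mp (by omega), ?_⟩
          intro a ha b hb hab
          rw [List.mem_singleton] at hb
          subst hb; exact hx (hab ▸ ha)
        · intro ⟨h1, _⟩; have := ih.mpr h1; omega

-- B's left-fold product loop computes pvProd
lemma pvProd_foldl (cands : List (List String)) (acc : List (List String)) :
    cands.foldl (fun cs cand => cs.flatMap (fun c => cand.map (fun uid => c ++ [uid]))) acc
      = acc.flatMap (fun c => (pvProd cands).map (fun q => c ++ q)) := by
  induction cands generalizing acc with
  | nil => simp [pvProd]
  | cons l rest ih =>
      rw [List.foldl_cons, ih]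
      simp only [pvProd, List.flatMap_assoc, List.flatMap_map, List.map_flatMap, List.map_map]
      congr 1
      funext c
      congr 1
      funext y
      congr 1
      funext q
      simp

-- the DFS's selections are the product combinations that are distinct and avoid path
lemma pvSels_eq_filter (cands : List (List String)) (path : List String) :
    pvSels cands path
      = (pvProd cands).filter
          (fun c => decide c.Nodup && c.all (fun y => !(path.contains y))) := by
  induction cands generalizing path with
  | nil => simp [pvSels, pvProd]
  | cons l rest ih =>
      simp only [pvSels, pvProd, List.filter_flatMap, List.filter_map]
      congr 1
      funext y
      by_cases hy : path.contains y
      · rw [if_pos hy]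
        symm
        rw [List.map_eq_nil_iff, List.filter_eq_nil_iff]
        intro c _
        have hmem : y ∈ path := by simpa using hy
        simp
        intro _ _ hnp
        exact absurd hmem hnp
      · rw [if_neg hy, ih (path ++ [y])]
        congr 1
        apply List.filter_congr
        intro c _
        simp only [Function.comp_apply]
        rw [Bool.eq_iff_iff]
        simp only [Bool.and_eq_true, decide_eq_true_eq, List.all_eq_true, List.nodup_cons,
          List.contains_eq_mem, List.mem_append, Bool.not_eq_eq_eq_not,
          Bool.not_true, decide_eq_false_iff_not, List.all_cons, List.mem_cons, not_or]
        constructor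
        · rintro ⟨hnd, hall⟩
          exact ⟨⟨fun hyc => (hall y hyc).2.1 rfl, hnd⟩, ⟨by simpa using hy, fun z hz => (hall z hz).1⟩⟩
        · rintro ⟨⟨hyc, hnd⟩, hnp, hall⟩
          exact ⟨hnd, fun z hz => ⟨hall z hz, fun hzy => hyc (hzy ▸ hz), by simp⟩⟩

-- dead DFS states (path strictly shorter than what index+1 admits) contribute nothing
lemma pvDfs_dead (m : Nat) (lists : List (List String)) (path : List String) (index : Int)
    (ans : PySem.Set (List String))
    (hm : ((lists.length : Int) - (index + 1)).toNat ≤ m)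
    (hlt : (path.length : Int) < index + 1) (hle : index + 1 ≤ (lists.length : Int)) :
    pvDfsA lists path index ans = ans := by
  induction m generalizing path index ans with
  | zero =>
      rw [pvDfsA, if_neg (by omega)]
      have hnil : PySem.List.pyRange (index + 1) (lists.length : Int) 1 = [] :=
        PySem.List.pyRange_one_eq_nil (by omega)
      rw [hnil]
      rfl
  | succ m ih =>
      rw [pvDfsA, if_neg (by omega)]
      apply pvFoldlFixed
      intro acc i _
      apply pvFoldlFixed
      intro acc2 id _
      have hi := (PySem.List.mem_pyRange_one).mp i.2
      by_cases hc : path.contains id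
      · rw [if_pos hc]
      · rw [if_neg hc]
        apply ih
        · omega
        · simp; omega
        · omega

-- live DFS states: the result is ans plus the sorted completions of path
lemma pvDfs_live (m : Nat) (lists : List (List String)) (path : List String) (index : Int)
    (ans : PySem.Set (List String))
    (hm : ((lists.length : Int) - (index + 1)).toNat ≤ m)
    (heq : (path.length : Int) = index + 1) (hle : path.length ≤ lists.length) :
    pvDfsA lists path index ans
      = ((pvSels (lists.drop path.length) path).map
            (fun q => PySem.List.sorted (path ++ q) (fun x => x) false)).foldl
          PySem.Set.add ans := by
  induction m generalizing path index ans with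
  | zero =>
      have hfull : path.length = lists.length := by omega
      rw [pvDfsA, if_pos hfull, hfull, List.drop_length]
      simp [pvSels]
  | succ m ih =>
      by_cases hfull : path.length = lists.length
      · rw [pvDfsA, if_pos hfull, hfull, List.drop_length]
        simp [pvSels]
      · have hlt : path.length < lists.length := by omega
        rw [pvDfsA, if_neg hfull]
        rw [List.foldl_attach
              (f := fun ans j => List.foldl
                (fun ans2 id => if path.contains id = true then ans2
                  else pvDfsA lists (path ++ [id]) j ans2) ans (PySem.List.pyGetD lists j []))]
        rw [← heq]
        rw [PySem.List.pyRange_one_cons (by omega)]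
        rw [List.foldl_cons]
        -- the tail of the range only visits dead states
        rw [pvFoldlFixed _ _ _ ?tail]
        case tail =>
          intro acc i hi
          have hib := (PySem.List.mem_pyRange_one).mp hi
          apply pvFoldlFixed
          intro acc2 id _
          by_cases hc : path.contains id
          · rw [if_pos hc]
          · rw [if_neg hc]
            apply pvDfs_dead m
            · omega
            · simp; omega
            · omega
        -- the head index: one pick from each element of lists[path.length]
        rw [PySem.List.pyGetD_natCast, List.getD_eq_getElem _ _ hlt]
        rw [List.drop_eq_getElem_cons hlt]
        show _ = ((pvSels (lists[path.length] :: lists.drop (path.length + 1)) path).map _).foldl _ _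
        rw [pvSels, List.map_flatMap, List.foldl_flatMap]
        apply PySem.List.foldl_congr_mem
        intro acc id hid
        by_cases hc : path.contains id
        · rw [if_pos hc, if_pos hc]
          rfl
        · rw [if_neg hc, if_neg hc]
          rw [ih (path ++ [id]) ((path.length : Int)) acc (by omega) (by simp) (by simp; omega)]
          simp only [List.length_append, List.length_cons, List.length_nil, List.map_map]
          congr 1
          apply List.map_congr_left
          intro q _
          simp [List.append_assoc]

-- ===== VERDICT (by name: the statement is the Claim_ definition above) =====
theorem solution_spec : Claim_equal_solution := by
  intro user_id banned_id _
  unfold Spec_solution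
  have ha : solution user_id banned_id
      = PySem.Set.len (pvDfsA (banned_id.foldl (fun ls bid => ls ++ [pvTempA user_id bid]) [])
          [] (-1) PySem.Set.empty) := rfl
  have hb : solution_alt user_id banned_id
      = PySem.Set.len (PySem.Set.ofList
          ((((banned_id.map (fun bid => user_id.filter (fun uid => pvMatchB uid bid))).foldl
                (fun cs cand => cs.flatMap (fun c => cand.map (fun uid => c ++ [uid]))) [[]]).filter
              (fun c => PySem.Set.len (PySem.Set.ofList c) == (c.length : Int))).map
            (fun c => PySem.List.sorted c (fun x => x) false))) := rfl
  rw [ha, hb]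
  -- A's banned_id_lists = B's candidates
  have hlists : banned_id.foldl (fun ls bid => ls ++ [pvTempA user_id bid]) []
      = banned_id.map (fun bid => user_id.filter (fun uid => pvMatchB uid bid)) := by
    rw [PySem.List.foldl_append_singleton_eq_map]
    simp only [List.nil_append]
    exact List.map_congr_left (fun bid _ => pvTempA_eq user_id bid)
  rw [hlists]
  set cands := banned_id.map (fun bid => user_id.filter (fun uid => pvMatchB uid bid)) with hc
  -- A's dfs result
  rw [pvDfs_live cands.length cands [] (-1) PySem.Set.empty (by omega) (by simp) (by simp)]
  -- B's combos = pvProd cands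
  rw [pvProd_foldl]
  simp only [List.flatMap_cons, List.flatMap_nil, List.append_nil, List.nil_append,
    List.map_id', List.drop_zero, List.length_nil]
  -- B's distinctness filter is the Nodup filter
  have hfilter : (pvProd cands).filter
        (fun c => PySem.Set.len (PySem.Set.ofList c) == (c.length : Int))
      = (pvProd cands).filter (fun c => decide c.Nodup && c.all (fun y => !(([] : List String).contains y))) := by
    apply List.filter_congr
    intro c _
    rw [Bool.eq_iff_iff]
    simp only [PySem.Set.len, beq_iff_eq, Bool.and_eq_true, decide_eq_true_eq, List.all_eq_true]
    constructor
    · intro h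
      refine ⟨(pvLenOfList_eq_iff c).mp (by exact_mod_cast h), by simp⟩
    · intro ⟨h, _⟩
      exact_mod_cast (pvLenOfList_eq_iff c).mpr h
  rw [hfilter, ← pvSels_eq_filter]
  rw [PySem.Set.ofList_eq_foldl]
  rfl
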